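-- pv_equiv track=rewrite | github.com/sukrucildirr/toploc | toploc/ndd.py | compute_newton_coefficients
-- ===== SOURCE A (Python) =====
-- MOD_N = 65497
--
-- def extended_gcd(a, b):
--     """
--     Returns (gcd, x, y) where gcd is the greatest common divisor of a and b
--     and x, y are coefficients where ax + by = gcd
--     """
--     if a == 0:
--         return (b, 0, 1)
--     else:
--         gcd, x, y = extended_gcd(b % a, a)
--         return (gcd, y - (b // a) * x, x)
--
-- def mod_inverse(a, m=MOD_N):
--     """
--     Returns the modular multiplicative inverse of a under modulo m
--     """
--     gcd, x, _ = extended_gcd(a, m)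
--     if gcd != 1:
--         raise ValueError(f"Modular inverse does not exist for {a} (mod {m})")
--     else:
--         return x % m
--
-- def multiply_polynomials_mod(poly1, poly2, mod=MOD_N):
--     """
--     Multiply two polynomials with coefficients under given modulus.
--     Polynomials are represented as lists of coefficients from lowest to highest degree.
--     """
--     result = [0] * (len(poly1) + len(poly2) - 1)
--     for i, coef1 in enumerate(poly1):
--         for j, coef2 in enumerate(poly2):
--             result[i + j] = (result[i + j] + coef1 * coef2) % mod
--     return result
--
-- def compute_newton_coefficients(x, y, mod=MOD_N):
--     """
--     Calculate coefficients for the interpolation polynomial in standard form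
--     (powers of x) using modular arithmetic.
--
--     Args:
--         x (list): x coordinates of points
--         y (list): y coordinates of points
--         mod (int): modulus for arithmetic operations
--
--     Returns:
--         list: Coefficients of polynomial in standard form (ascending powers of x)
--     """
--     n = len(x)
--     # First calculate Newton coefficients
--     newton_coef = [[0] * n for _ in range(n)]
--
--     # First column is y values
--     for i in range(n):
--         newton_coef[i][0] = y[i] % mod
--
--     # Calculate divided differences
--     for j in range(1, n):
--         for i in range(n - j):
--             numerator = (newton_coef[i + 1][j - 1] - newton_coef[i][j - 1]) % mod
--             denominator = (x[i + j] - x[i]) % mod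
--             inv_denominator = mod_inverse(denominator, mod)
--             newton_coef[i][j] = (numerator * inv_denominator) % mod
--
--     newton_coeffs = [newton_coef[0][j] for j in range(n)]
--
--     # Convert Newton form to standard form
--     result = [newton_coeffs[0]]  # constant term
--     current_term = [1]  # start with 1
--
--     for i in range(n - 1):
--         # Multiply current_term by (x - x[i])
--         next_term = [(-x[i] % mod)] + [1]  # represents (x - x[i])
--         current_term = multiply_polynomials_mod(current_term, next_term, mod)
--
--         # Add newton_coeffs[i+1] * current_term to result
--         while len(result) < len(current_term):
--             result.append(0)
--         for j, coef in enumerate(current_term):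
--             result[j] = (result[j] + (newton_coeffs[i + 1] * coef)) % mod
--
--     return result
-- ===== SOURCE B (Python) =====
-- MOD_N = 65497
--
-- def extended_gcd(a, b):
--     if a == 0:
--         return (b, 0, 1)
--     gcd, x, y = extended_gcd(b % a, a)
--     return (gcd, y - (b // a) * x, x)
--
-- def mod_inverse(a, m=MOD_N):
--     gcd, x, _ = extended_gcd(a, m)
--     if gcd != 1:
--         raise ValueError(f"Modular inverse does not exist for {a} (mod {m})")
--     return x % m
--
-- def compute_newton_coefficients(x, y, mod=MOD_N):
--     n = len(x)
--     # In-place divided differences: one 1-D array instead of an n*n table.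
--     coef = [y[i] % mod for i in range(n)]
--     for j in range(1, n):
--         for i in range(n - 1, j - 1, -1):
--             inv = mod_inverse((x[i] - x[i - j]) % mod, mod)
--             coef[i] = ((coef[i] - coef[i - 1]) * inv) % mod
--     # Horner conversion to standard form, built back-to-front:
--     # result := result*(X - x[i]) + coef[i]
--     result = [coef[n - 1]]
--     for i in range(n - 2, -1, -1):
--         m = len(result)
--         new = [(coef[i] - result[0] * x[i]) % mod]
--         for k in range(1, m):
--             new.append((result[k - 1] - result[k] * x[i]) % mod)
--         new.append(result[m - 1])
--         result = new
--     return result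
-- ===== Notes on version B (the rewrite author's own statement) =====
-- stated objective: alternative
-- what changed: B computes the divided differences in a single 1-D array updated in place (back-to-front) instead of A's n-by-n table, and converts Newton form to standard coefficients by a back-to-front Horner scheme (result = result*(X - x[i]) + coef[i]) instead of A's forward accumulation with repeated modular polynomial multiplication.
import Mathlib
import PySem

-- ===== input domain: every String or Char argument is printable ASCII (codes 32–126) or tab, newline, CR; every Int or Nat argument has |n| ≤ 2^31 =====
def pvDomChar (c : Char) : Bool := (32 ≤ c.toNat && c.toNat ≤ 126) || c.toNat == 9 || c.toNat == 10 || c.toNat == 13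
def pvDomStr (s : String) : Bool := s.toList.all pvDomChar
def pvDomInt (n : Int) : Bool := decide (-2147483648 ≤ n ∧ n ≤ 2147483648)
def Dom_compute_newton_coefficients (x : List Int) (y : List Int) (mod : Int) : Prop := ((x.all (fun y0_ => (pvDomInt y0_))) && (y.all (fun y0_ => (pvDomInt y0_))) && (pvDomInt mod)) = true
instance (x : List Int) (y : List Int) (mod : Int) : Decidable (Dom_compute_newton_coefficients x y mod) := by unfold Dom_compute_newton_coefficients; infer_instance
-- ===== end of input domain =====

-- B replaces A's n×n divided-difference table by a 1-D in-place array and the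
-- polynomial-product accumulation by a back-to-front Horner conversion (objective: alternative).


-- ===== PORT A =====
-- termination fact for the extended_gcd recursion (cited by pvEgcd's decreasing_by)
theorem pvMod_natAbs_lt (b a : Int) (h : a ≠ 0) : (PySem.Int.mod b a).natAbs < a.natAbs := by
  rcases lt_or_gt_of_ne h with hneg | hpos
  · have := PySem.Int.mod_neg_bounds b hneg
    omega
  · have h1 := PySem.Int.mod_nonneg b hpos
    have h2 := PySem.Int.mod_lt b hpos
    omega

def pvEgcd (a b : Int) : Int × Int × Int :=
  if _h : a = 0 then (b, 0, 1)
  else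
    let r := pvEgcd (PySem.Int.mod b a) a
    (r.1, r.2.2 - PySem.Int.floordiv b a * r.2.1, r.2.1)
termination_by a.natAbs
decreasing_by exact pvMod_natAbs_lt b a _h

-- mod_inverse: none exactly where Python raises ValueError
def pvModInverse? (a m : Int) : Option Int :=
  let r := pvEgcd a m
  if r.1 ≠ 1 then none else some (PySem.Int.mod r.2.1 m)

def pvGet2 (t : List (List Int)) (i j : Nat) : Int := (t.getD i []).getD j 0
def pvSet2 (t : List (List Int)) (i j : Nat) (v : Int) : List (List Int) :=
  t.set i ((t.getD i []).set j v)

def pvMulPolyMod (p1 p2 : List Int) (m : Int) : List Int :=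
  (PySem.List.enumerate p1).foldl (fun res ic =>
    (PySem.List.enumerate p2).foldl (fun res jc =>
      res.set (ic.1 + jc.1).toNat
        (PySem.Int.mod (res.getD (ic.1 + jc.1).toNat 0 + ic.2 * jc.2) m)) res)
    (List.replicate (p1.length + p2.length - 1) 0)

def compute_newton_coefficients (x : List Int) (y : List Int) (mod : Int) : List Int :=
  let n := x.length
  let nc0 : List (List Int) := List.replicate n (List.replicate n 0)
  let nc1 := (List.range n).foldl (fun nc i => pvSet2 nc i 0 (PySem.Int.mod (y.getD i 0) mod)) nc0
  let nc2 := (List.range' 1 (n - 1)).foldl (fun nc j =>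
      (List.range (n - j)).foldl (fun nc i =>
        let numerator := PySem.Int.mod (pvGet2 nc (i+1) (j-1) - pvGet2 nc i (j-1)) mod
        let denominator := PySem.Int.mod (x.getD (i+j) 0 - x.getD i 0) mod
        let inv := (pvModInverse? denominator mod).getD 0
        pvSet2 nc i j (PySem.Int.mod (numerator * inv) mod)) nc) nc1
  let newton_coeffs := (List.range n).map (fun j => pvGet2 nc2 0 j)
  let st := (List.range (n - 1)).foldl (fun (st : List Int × List Int) i =>
      let next_term := [PySem.Int.mod (-(x.getD i 0)) mod, 1]
      let ct := pvMulPolyMod st.2 next_term mod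
      let res := st.1 ++ List.replicate (ct.length - st.1.length) 0
      let res2 := (PySem.List.enumerate ct).foldl (fun r jc =>
          r.set jc.1.toNat
            (PySem.Int.mod (r.getD jc.1.toNat 0 + newton_coeffs.getD (i+1) 0 * jc.2) mod)) res
      (res2, ct)) ([newton_coeffs.getD 0 0], [1])
  st.1

-- ===== PORT B =====
def compute_newton_coefficients_alt (x : List Int) (y : List Int) (mod : Int) : List Int :=
  let n := x.length
  let coef0 := (List.range n).map (fun i => PySem.Int.mod (y.getD i 0) mod)
  let coef := (List.range' 1 (n - 1)).foldl (fun coef j =>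
      ((List.range' j (n - j)).reverse).foldl (fun coef i =>
        let inv := (pvModInverse? (PySem.Int.mod (x.getD i 0 - x.getD (i - j) 0) mod) mod).getD 0
        coef.set i (PySem.Int.mod ((coef.getD i 0 - coef.getD (i - 1) 0) * inv) mod)) coef) coef0
  let res0 := [coef.getD (n - 1) 0]
  ((List.range (n - 1)).reverse).foldl (fun r i =>
      let m0 := r.length
      let hd := PySem.Int.mod (coef.getD i 0 - r.getD 0 0 * x.getD i 0) mod
      let mids := (List.range' 1 (m0 - 1)).map
        (fun k => PySem.Int.mod (r.getD (k - 1) 0 - r.getD k 0 * x.getD i 0) mod)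
      (hd :: mids) ++ [r.getD (m0 - 1) 0]) res0

-- ===== PRECONDITION & SPEC =====
-- Pre_ admits exactly the inputs on which A returns: it excludes n = 0 and len(y) < len(x)
-- (IndexError), mod = 0 (ZeroDivisionError), and, when n ≥ 2, mod ≤ 0 or a pair of x-values whose
-- difference is not invertible mod `mod` (ValueError from mod_inverse).
def Pre_compute_newton_coefficients (x : List Int) (y : List Int) (mod : Int) : Prop :=
  1 ≤ x.length ∧ x.length ≤ y.length ∧ mod ≠ 0 ∧
  (2 ≤ x.length → 0 < mod ∧ x.Pairwise (fun a b => Int.gcd (b - a) mod = 1))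
instance (x : List Int) (y : List Int) (mod : Int) : Decidable (Pre_compute_newton_coefficients x y mod) := by unfold Pre_compute_newton_coefficients; infer_instance

def pvWitness_compute_newton_coefficients : List Int × List Int × Int := ([0, 1], [3, 4], 5)

def Spec_compute_newton_coefficients (x : List Int) (y : List Int) (mod : Int) (out : List Int) : Prop := out = compute_newton_coefficients_alt x y mod
instance (x : List Int) (y : List Int) (mod : Int) (out : List Int) : Decidable (Spec_compute_newton_coefficients x y mod out) := by unfold Spec_compute_newton_coefficients; infer_instance

-- ===== CLAIM (what is proved, stated in full; the proofs are below) =====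
def Claim_equal_compute_newton_coefficients : Prop := ∀ (x : List Int) (y : List Int) (mod : Int), Dom_compute_newton_coefficients x y mod → Pre_compute_newton_coefficients x y mod → Spec_compute_newton_coefficients x y mod (compute_newton_coefficients x y mod)

-- ===== LEMMAS AND PROOFS =====

-- ---- generic list/mod toolkit ----

theorem pvGetD_set {α : Type} (l : List α) (i k : Nat) (v d : α) :
    (l.set i v).getD k d = if i = k ∧ i < l.length then v else l.getD k d := by
  rw [List.getD_eq_getElem?_getD, List.getD_eq_getElem?_getD, List.getElem?_set]
  split_ifs with h1 h2 h3 <;> (try simp_all) <;> (try omega)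

theorem pvGetD_pad (l : List Int) (d k : Nat) :
    (l ++ List.replicate d (0:Int)).getD k 0 = l.getD k 0 := by
  rcases Nat.lt_or_ge k l.length with h | h
  · rw [List.getD_append _ _ _ _ h]
  · rw [List.getD_eq_default _ _ h]
    rw [List.getD_eq_getElem?_getD, List.getElem?_append_right h]
    rcases Nat.lt_or_ge (k - l.length) d with h2 | h2
    · simp [h2]
    · rw [List.getElem?_eq_none (by simpa using h2)]
      rfl

theorem pvList_eq_of_getD (l1 l2 : List Int) (h : l1.length = l2.length)
    (h2 : ∀ k, l1.getD k 0 = l2.getD k 0) : l1 = l2 := by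
  apply List.ext_getElem h
  intro k h3 h4
  have := h2 k
  rwa [List.getD_eq_getElem _ _ h3, List.getD_eq_getElem _ _ h4] at this

theorem pvEnum_eq (xs : List Int) (s : Int) :
    (PySem.List.enumerate xs s) = (List.range xs.length).map (fun (k : Nat) => (s + (k:Int), xs.getD k 0)) := by
  induction xs generalizing s with
  | nil => simp [PySem.List.enumerate_nil]
  | cons a t ih =>
      rw [PySem.List.enumerate_cons, ih]
      simp only [List.length_cons, List.range_succ_eq_map, List.map_cons, List.map_map,
        Function.comp_def]
      congr 1
      · simp
      · apply List.map_congr_left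
        intro k _
        simp only [List.getD_cons_succ]
        push_cast
        congr 1
        ring

theorem pvRevRange'_succ (j c : Nat) :
    (List.range' j (c+1)).reverse = (j+c) :: (List.range' j c).reverse := by
  rw [List.range'_1_concat, List.reverse_append]
  rfl

theorem pvRevRange_succ (c : Nat) :
    (List.range (c+1)).reverse = c :: (List.range c).reverse := by
  rw [List.range_succ, List.reverse_append]
  rfl

-- mod facts (0 < m)
theorem pvPm_cong (m a b : Int) (hm : 0 < m) (h : a ≡ b [ZMOD m]) :
    PySem.Int.mod a m = PySem.Int.mod b m := by
  rw [PySem.Int.mod_eq_emod_of_pos hm, PySem.Int.mod_eq_emod_of_pos hm]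
  exact h

theorem pvPm_modeq (m a : Int) (hm : 0 < m) : PySem.Int.mod a m ≡ a [ZMOD m] := by
  rw [PySem.Int.mod_eq_emod_of_pos hm]
  exact Int.mod_modEq a m

theorem pvPm_idem (m a : Int) (hm : 0 < m) :
    PySem.Int.mod (PySem.Int.mod a m) m = PySem.Int.mod a m :=
  pvPm_cong m _ a hm (pvPm_modeq m a hm)

theorem pvPm_zero (m : Int) (hm : 0 < m) : PySem.Int.mod 0 m = 0 := by
  rw [PySem.Int.mod_eq_emod_of_pos hm]
  simp

-- ---- reference objects ----

-- divided differences exactly as A computes them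
def pvDD (x y : List Int) (m : Int) : Nat → Nat → Int
  | i, 0 => PySem.Int.mod (y.getD i 0) m
  | i, j+1 => PySem.Int.mod (PySem.Int.mod (pvDD x y m (i+1) j - pvDD x y m i j) m *
      ((pvModInverse? (PySem.Int.mod (x.getD (i+j+1) 0 - x.getD i 0) m) m).getD 0)) m

theorem pvDD_canon (x y : List Int) (m : Int) (hm : 0 < m) (i j : Nat) :
    PySem.Int.mod (pvDD x y m i j) m = pvDD x y m i j := by
  cases j <;> exact pvPm_idem m _ hm

-- coefficient function of multiplication by (X + c)
def pvRefStep (f : Nat → Int) (c : Int) : Nat → Int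
  | 0 => f 0 * c
  | k+1 => f k + f (k+1) * c

-- coefficient k of ∏_{s ≤ t < j} (X - x_t)
def pvProd (x : List Int) (s : Nat) : Nat → Nat → Int
  | 0, k => if k = 0 then 1 else 0
  | j+1, k => if j+1 ≤ s then (if k = 0 then 1 else 0)
      else pvRefStep (pvProd x s j) (-(x.getD j 0)) k

theorem pvProd_self (x : List Int) (s : Nat) (k : Nat) :
    pvProd x s s k = if k = 0 then 1 else 0 := by
  cases s with
  | zero => rfl
  | succ j => simp [pvProd]

theorem pvProd_vanish (x : List Int) (s j k : Nat) (h : j - s < k) : pvProd x s j k = 0 := by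
  induction j generalizing k with
  | zero => simp [pvProd]; omega
  | succ j ih =>
      by_cases hs : j+1 ≤ s
      · simp [pvProd, hs]; omega
      · have h1 : 0 < k := by omega
        obtain ⟨k', rfl⟩ : ∃ k', k = k' + 1 := ⟨k - 1, by omega⟩
        simp only [pvProd, hs, if_false, pvRefStep]
        rw [ih k' (by omega), ih (k'+1) (by omega)]
        ring

theorem pvRefStep_comm (f : Nat → Int) (c d : Int) (k : Nat) :
    pvRefStep (pvRefStep f c) d k = pvRefStep (pvRefStep f d) c k := by
  match k with
  | 0 => simp [pvRefStep]; ring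
  | 1 => simp [pvRefStep]; ring
  | k+2 => simp [pvRefStep]; ring

theorem pvProd_front (x : List Int) (s j : Nat) (h : s < j) (k : Nat) :
    pvProd x s j k = pvRefStep (pvProd x (s+1) j) (-(x.getD s 0)) k := by
  induction j generalizing k with
  | zero => omega
  | succ j ih =>
      by_cases hj : s < j
      · have h1 : ¬ (j+1 ≤ s) := by omega
        have h2 : ¬ (j+1 ≤ s+1) := by omega
        simp only [pvProd, h1, h2, if_false]
        have hf : pvProd x s j = pvRefStep (pvProd x (s+1) j) (-(x.getD s 0)) := funext (ih hj)
        rw [hf, pvRefStep_comm]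
      · have hj' : j = s := by omega
        subst hj'
        have h1 : ¬ (j+1 ≤ j) := by omega
        simp only [pvProd, h1, if_false, Nat.le_refl, if_true]
        have hs : pvProd x j j = fun k => if k = 0 then (1:Int) else 0 := funext (pvProd_self x j)
        have hs2 : pvProd x (j+1) (j+1) = fun k => if k = 0 then (1:Int) else 0 := funext (pvProd_self x (j+1))
        rw [hs]

-- partial forward sums (A) and suffix Horner sums (B)
def pvARef (x y : List Int) (m : Int) (t k : Nat) : Int :=
  ∑ j ∈ Finset.range (t+1), pvDD x y m 0 j * pvProd x 0 j k

def pvBRef (x y : List Int) (m : Int) (i k : Nat) : Int :=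
  ∑ j ∈ Finset.Ico i x.length, pvDD x y m 0 j * pvProd x i j k

theorem pvARef_vanish (x y : List Int) (m : Int) (t k : Nat) (h : t < k) :
    pvARef x y m t k = 0 := by
  unfold pvARef
  apply Finset.sum_eq_zero
  intro j hj
  rw [pvProd_vanish x 0 j k (by simp at hj; omega), mul_zero]

theorem pvBRef_vanish (x y : List Int) (m : Int) (i k : Nat) (h : x.length ≤ k + i) :
    pvBRef x y m i k = 0 := by
  unfold pvBRef
  apply Finset.sum_eq_zero
  intro j hj
  rw [pvProd_vanish x i j k (by simp at hj; omega), mul_zero]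

theorem pvBRef_zero_rec (x y : List Int) (m : Int) (i : Nat) (h : i < x.length) :
    pvBRef x y m i 0 = pvDD x y m 0 i - pvBRef x y m (i+1) 0 * x.getD i 0 := by
  unfold pvBRef
  rw [Finset.sum_eq_sum_Ico_succ_bot h]
  have hc : ∀ j ∈ Finset.Ico (i+1) x.length,
      pvDD x y m 0 j * pvProd x i j 0 = -(pvDD x y m 0 j * pvProd x (i+1) j 0 * x.getD i 0) := by
    intro j hj
    simp only [Finset.mem_Ico] at hj
    rw [pvProd_front x i j (by omega)]
    simp only [pvRefStep]
    ring
  rw [Finset.sum_congr rfl hc, pvProd_self]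
  simp only [if_true, mul_one, Finset.sum_neg_distrib, Finset.sum_mul]
  ring

theorem pvBRef_succ_rec (x y : List Int) (m : Int) (i k : Nat) (h : i < x.length) :
    pvBRef x y m i (k+1) = pvBRef x y m (i+1) k - pvBRef x y m (i+1) (k+1) * x.getD i 0 := by
  unfold pvBRef
  rw [Finset.sum_eq_sum_Ico_succ_bot h]
  have hc : ∀ j ∈ Finset.Ico (i+1) x.length,
      pvDD x y m 0 j * pvProd x i j (k+1) =
        pvDD x y m 0 j * pvProd x (i+1) j k - pvDD x y m 0 j * pvProd x (i+1) j (k+1) * x.getD i 0 := by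
    intro j hj
    simp only [Finset.mem_Ico] at hj
    rw [pvProd_front x i j (by omega)]
    simp only [pvRefStep]
    ring
  rw [Finset.sum_congr rfl hc, pvProd_self]
  simp only [Finset.sum_sub_distrib, Finset.sum_mul]
  simp

-- ---- stage 1, port A: the n x n table ----

def pvShape (n : Nat) (t : List (List Int)) : Prop := t.length = n ∧ ∀ r ∈ t, r.length = n

theorem pvShape_set2 (n : Nat) (t : List (List Int)) (i j : Nat) (v : Int)
    (h : pvShape n t) (hi : i < n) : pvShape n (pvSet2 t i j v) := by
  obtain ⟨h1, h2⟩ := h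
  refine ⟨by simp [pvSet2, h1], ?_⟩
  intro r hr
  rcases List.mem_or_eq_of_mem_set hr with h3 | h3
  · exact h2 r h3
  · subst h3
    rw [List.length_set]
    have hi' : i < t.length := by omega
    exact h2 _ (by rw [List.getD_eq_getElem _ _ hi']; exact List.getElem_mem hi')

theorem pvGet2_set2_same (n : Nat) (t : List (List Int)) (i j : Nat) (v : Int)
    (h : pvShape n t) (hi : i < n) (hj : j < n) : pvGet2 (pvSet2 t i j v) i j = v := by
  obtain ⟨h1, h2⟩ := h
  have hi' : i < t.length := by omega
  have hrow : (t.getD i []).length = n :=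
    h2 _ (by rw [List.getD_eq_getElem _ _ hi']; exact List.getElem_mem hi')
  unfold pvGet2 pvSet2
  rw [pvGetD_set, if_pos ⟨rfl, hi'⟩, pvGetD_set, if_pos ⟨rfl, by omega⟩]

theorem pvGet2_set2_ne (t : List (List Int)) (i j i' j' : Nat) (v : Int)
    (h : i ≠ i' ∨ j ≠ j') : pvGet2 (pvSet2 t i j v) i' j' = pvGet2 t i' j' := by
  unfold pvGet2 pvSet2
  rw [pvGetD_set]
  split_ifs with hc
  · obtain ⟨rfl, _⟩ := hc
    rw [pvGetD_set, if_neg (by tauto)]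
  · rfl

-- generic column-update loop: writes column j at rows 0..cnt-1, value read from columns ≠ j
theorem pvColLoop (n j cnt : Nat) (hcnt : cnt ≤ n) (hj : j < n)
    (v : List (List Int) → Nat → Int)
    (hv : ∀ nc nc' : List (List Int),
      (∀ i' j', j' ≠ j → pvGet2 nc i' j' = pvGet2 nc' i' j') → ∀ i, v nc i = v nc' i)
    (nc : List (List Int)) (hs : pvShape n nc) :
    pvShape n ((List.range cnt).foldl (fun nc i => pvSet2 nc i j (v nc i)) nc) ∧
    (∀ i' j', j' ≠ j → pvGet2 ((List.range cnt).foldl (fun nc i => pvSet2 nc i j (v nc i)) nc) i' j' = pvGet2 nc i' j') ∧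
    (∀ i', i' < cnt → pvGet2 ((List.range cnt).foldl (fun nc i => pvSet2 nc i j (v nc i)) nc) i' j = v nc i') ∧
    (∀ i', cnt ≤ i' → pvGet2 ((List.range cnt).foldl (fun nc i => pvSet2 nc i j (v nc i)) nc) i' j = pvGet2 nc i' j) := by
  induction cnt with
  | zero => exact ⟨hs, fun _ _ _ => rfl, fun _ h => by omega, fun _ _ => rfl⟩
  | succ c ih =>
      obtain ⟨IH1, IH2, IH3, IH4⟩ := ih (by omega)
      rw [List.range_succ, List.foldl_append]
      set R := (List.range c).foldl (fun nc i => pvSet2 nc i j (v nc i)) nc with hR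
      simp only [List.foldl_cons, List.foldl_nil]
      have hvR : v R c = v nc c := hv R nc (fun i' j' hne => IH2 i' j' hne) c
      refine ⟨pvShape_set2 n R c j _ IH1 (by omega), ?_, ?_, ?_⟩
      · intro i' j' hne
        rw [pvGet2_set2_ne _ _ _ _ _ _ (Or.inr hne.symm)]
        exact IH2 i' j' hne
      · intro i' hi'
        rcases Nat.lt_or_ge i' c with h4 | h4
        · rw [pvGet2_set2_ne _ _ _ _ _ _ (Or.inl (by omega))]
          exact IH3 i' h4
        · have : i' = c := by omega
          subst this
          rw [pvGet2_set2_same n R i' j _ IH1 (by omega) hj, hvR]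
      · intro i' hi'
        rw [pvGet2_set2_ne _ _ _ _ _ _ (Or.inl (by omega))]
        exact IH4 i' (by omega)

-- ---- mirrors of the two port pipelines (definitionally equal to the ports) ----

def pvNC1 (x y : List Int) (m : Int) : List (List Int) :=
  (List.range x.length).foldl (fun nc i => pvSet2 nc i 0 (PySem.Int.mod (y.getD i 0) m))
    (List.replicate x.length (List.replicate x.length 0))

def pvNC2 (x y : List Int) (m : Int) : List (List Int) :=
  (List.range' 1 (x.length - 1)).foldl (fun nc j =>
    (List.range (x.length - j)).foldl (fun nc i =>
      pvSet2 nc i j (PySem.Int.mod (PySem.Int.mod (pvGet2 nc (i+1) (j-1) - pvGet2 nc i (j-1)) m *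
        ((pvModInverse? (PySem.Int.mod (x.getD (i+j) 0 - x.getD i 0) m) m).getD 0)) m)) nc) (pvNC1 x y m)

def pvNewton (x y : List Int) (m : Int) : List Int :=
  (List.range x.length).map (fun j => pvGet2 (pvNC2 x y m) 0 j)

def pvStA (x : List Int) (m : Int) (nw : List Int) : List Int × List Int :=
  (List.range (x.length - 1)).foldl (fun st i =>
    let ct := pvMulPolyMod st.2 [PySem.Int.mod (-(x.getD i 0)) m, 1] m
    let res := st.1 ++ List.replicate (ct.length - st.1.length) 0
    ((PySem.List.enumerate ct).foldl (fun r jc =>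
        r.set jc.1.toNat (PySem.Int.mod (r.getD jc.1.toNat 0 + nw.getD (i+1) 0 * jc.2) m)) res, ct))
    ([nw.getD 0 0], [1])

def pvCoefB (x y : List Int) (m : Int) : List Int :=
  (List.range' 1 (x.length - 1)).foldl (fun coef j =>
    ((List.range' j (x.length - j)).reverse).foldl (fun coef i =>
      coef.set i (PySem.Int.mod ((coef.getD i 0 - coef.getD (i - 1) 0) *
        ((pvModInverse? (PySem.Int.mod (x.getD i 0 - x.getD (i - j) 0) m) m).getD 0)) m)) coef)
    ((List.range x.length).map (fun i => PySem.Int.mod (y.getD i 0) m))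

def pvStB (x : List Int) (m : Int) (coefB : List Int) : List Int :=
  ((List.range (x.length - 1)).reverse).foldl (fun r i =>
    (PySem.Int.mod (coefB.getD i 0 - r.getD 0 0 * x.getD i 0) m ::
      (List.range' 1 (r.length - 1)).map (fun k => PySem.Int.mod (r.getD (k - 1) 0 - r.getD k 0 * x.getD i 0) m)) ++
      [r.getD (r.length - 1) 0])
    [coefB.getD (x.length - 1) 0]

theorem pvPortA_eq (x y : List Int) (m : Int) :
    compute_newton_coefficients x y m = (pvStA x m (pvNewton x y m)).1 := rfl

theorem pvPortB_eq (x y : List Int) (m : Int) :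
    compute_newton_coefficients_alt x y m = pvStB x m (pvCoefB x y m) := rfl

-- ---- stage 1, port A: the table's first row is pvDD 0 · ----

theorem pvShape_rep (n : Nat) : pvShape n (List.replicate n (List.replicate n (0:Int))) :=
  ⟨by simp, fun r hr => by rw [List.eq_of_mem_replicate hr]; simp⟩

theorem pvNC1_spec (x y : List Int) (m : Int) (hn : 0 < x.length) :
    pvShape x.length (pvNC1 x y m) ∧
    ∀ i, i < x.length → pvGet2 (pvNC1 x y m) i 0 = pvDD x y m i 0 := by
  obtain ⟨S, _, G, _⟩ := pvColLoop x.length 0 x.length le_rfl hn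
    (fun _ i => PySem.Int.mod (y.getD i 0) m) (fun _ _ _ _ => rfl)
    (List.replicate x.length (List.replicate x.length 0)) (pvShape_rep x.length)
  exact ⟨S, fun i hi => by rw [pvNC1]; exact G i hi⟩

theorem pvNC2_aux (x y : List Int) (m : Int) (hn : 0 < x.length) (cnt : Nat)
    (hcnt : cnt ≤ x.length - 1) :
    pvShape x.length ((List.range' 1 cnt).foldl (fun nc j =>
      (List.range (x.length - j)).foldl (fun nc i =>
        pvSet2 nc i j (PySem.Int.mod (PySem.Int.mod (pvGet2 nc (i+1) (j-1) - pvGet2 nc i (j-1)) m *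
          ((pvModInverse? (PySem.Int.mod (x.getD (i+j) 0 - x.getD i 0) m) m).getD 0)) m)) nc) (pvNC1 x y m)) ∧
    ∀ j' i', j' ≤ cnt → i' + j' < x.length →
      pvGet2 ((List.range' 1 cnt).foldl (fun nc j =>
        (List.range (x.length - j)).foldl (fun nc i =>
          pvSet2 nc i j (PySem.Int.mod (PySem.Int.mod (pvGet2 nc (i+1) (j-1) - pvGet2 nc i (j-1)) m *
            ((pvModInverse? (PySem.Int.mod (x.getD (i+j) 0 - x.getD i 0) m) m).getD 0)) m)) nc) (pvNC1 x y m)) i' j'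
        = pvDD x y m i' j' := by
  induction cnt with
  | zero =>
      obtain ⟨S, G⟩ := pvNC1_spec x y m hn
      refine ⟨S, fun j' i' hj' hi' => ?_⟩
      interval_cases j'
      exact G i' (by omega)
  | succ c ih =>
      obtain ⟨IHS, IHG⟩ := ih (by omega)
      rw [List.range'_1_concat, List.foldl_append, List.foldl_cons, List.foldl_nil]
      set NC := (List.range' 1 c).foldl _ (pvNC1 x y m) with hNC
      obtain ⟨S, GNE, GNEW, _⟩ := pvColLoop x.length (1+c) (x.length - (1+c))
        (by omega) (by omega)
        (fun nc i => PySem.Int.mod (PySem.Int.mod (pvGet2 nc (i+1) (1+c-1) - pvGet2 nc i (1+c-1)) m *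
          ((pvModInverse? (PySem.Int.mod (x.getD (i+(1+c)) 0 - x.getD i 0) m) m).getD 0)) m)
        (fun nc nc' hcols i => by beta_reduce; rw [hcols (i+1) (1+c-1) (by omega), hcols i (1+c-1) (by omega)])
        NC IHS
      refine ⟨S, fun j' i' hj' hi' => ?_⟩
      rcases Nat.lt_or_ge j' (c+1) with h4 | h4
      · rw [GNE i' j' (by omega)]
        exact IHG j' i' (by omega) hi'
      · have hj'' : j' = 1 + c := by omega
        subst hj''
        rw [GNEW i' (by omega)]
        have e1 : 1 + c - 1 = c := by omega
        rw [e1, IHG c (i'+1) (by omega) (by omega), IHG c i' (by omega) (by omega)]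
        have e2 : 1 + c = c + 1 := by omega
        rw [e2]
        show _ = pvDD x y m i' (c+1)
        rw [pvDD]
        have e5 : i' + (c + 1) = i' + c + 1 := by omega
        rw [e5]

theorem pvNewton_spec (x y : List Int) (m : Int) (hn : 0 < x.length) :
    ∀ j, j < x.length → (pvNewton x y m).getD j 0 = pvDD x y m 0 j := by
  intro j hj
  rw [pvNewton, PySem.List.getD_map_range _ _ _ _ hj]
  obtain ⟨_, G⟩ := pvNC2_aux x y m hn (x.length - 1) le_rfl
  exact G j 0 (by omega) (by omega)

-- ---- stage 1, port B: in-place array ends as pvDD 0 · ----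

theorem pvDescLoop (n j c : Nat) (w : Nat → Int) (m : Int) (hc : j + c ≤ n) :
    ∀ s : List Int, s.length = n →
    (((List.range' j c).reverse).foldl (fun coef i =>
        coef.set i (PySem.Int.mod ((coef.getD i 0 - coef.getD (i-1) 0) * w i) m)) s).length = n ∧
    (∀ i, i < j ∨ j + c ≤ i →
      (((List.range' j c).reverse).foldl (fun coef i =>
        coef.set i (PySem.Int.mod ((coef.getD i 0 - coef.getD (i-1) 0) * w i) m)) s).getD i 0 = s.getD i 0) ∧
    (∀ i, j ≤ i → i < j + c →
      (((List.range' j c).reverse).foldl (fun coef i =>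
        coef.set i (PySem.Int.mod ((coef.getD i 0 - coef.getD (i-1) 0) * w i) m)) s).getD i 0
        = PySem.Int.mod ((s.getD i 0 - s.getD (i-1) 0) * w i) m) := by
  induction c with
  | zero => exact fun s hs => ⟨hs, fun _ _ => rfl, fun i h1 h2 => by omega⟩
  | succ c ih =>
      intro s hs
      rw [pvRevRange'_succ, List.foldl_cons]
      set s1 := s.set (j+c) (PySem.Int.mod ((s.getD (j+c) 0 - s.getD (j+c-1) 0) * w (j+c)) m) with hs1
      have hs1len : s1.length = n := by rw [hs1, List.length_set, hs]
      obtain ⟨L, GO, GI⟩ := ih (by omega) s1 hs1len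
      have hget : ∀ i, i ≠ j + c → s1.getD i 0 = s.getD i 0 := by
        intro i hi
        rw [hs1, pvGetD_set, if_neg (by omega)]
      refine ⟨L, ?_, ?_⟩
      · intro i hi
        rw [GO i (by omega), hget i (by omega)]
      · intro i hi1 hi2
        rcases Nat.lt_or_ge i (j+c) with h4 | h4
        · rw [GI i hi1 (by omega), hget i (by omega), hget (i-1) (by omega)]
        · have : i = j + c := by omega
          subst this
          rw [GO (j+c) (by omega), hs1, pvGetD_set, if_pos ⟨rfl, by omega⟩]

theorem pvCoefB_aux (x y : List Int) (m : Int) (hm : 0 < m) (hn : 0 < x.length) (cnt : Nat)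
    (hcnt : cnt ≤ x.length - 1) :
    ((List.range' 1 cnt).foldl (fun coef j =>
      ((List.range' j (x.length - j)).reverse).foldl (fun coef i =>
        coef.set i (PySem.Int.mod ((coef.getD i 0 - coef.getD (i - 1) 0) *
          ((pvModInverse? (PySem.Int.mod (x.getD i 0 - x.getD (i - j) 0) m) m).getD 0)) m)) coef)
      ((List.range x.length).map (fun i => PySem.Int.mod (y.getD i 0) m))).length = x.length ∧
    ∀ i, i < x.length →
      ((List.range' 1 cnt).foldl (fun coef j =>
        ((List.range' j (x.length - j)).reverse).foldl (fun coef i =>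
          coef.set i (PySem.Int.mod ((coef.getD i 0 - coef.getD (i - 1) 0) *
            ((pvModInverse? (PySem.Int.mod (x.getD i 0 - x.getD (i - j) 0) m) m).getD 0)) m)) coef)
        ((List.range x.length).map (fun i => PySem.Int.mod (y.getD i 0) m))).getD i 0
        = if i < cnt then pvDD x y m 0 i else pvDD x y m (i - cnt) cnt := by
  induction cnt with
  | zero =>
      refine ⟨by simp, fun i hi => ?_⟩
      have h0 : (List.range' 1 0) = ([] : List Nat) := rfl
      rw [h0, List.foldl_nil, PySem.List.getD_map_range _ _ _ _ hi]
      simp only [Nat.not_lt_zero, if_false, Nat.sub_zero]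
      rfl
  | succ c ih =>
      obtain ⟨IHL, IHG⟩ := ih (by omega)
      rw [List.range'_1_concat, List.foldl_append, List.foldl_cons, List.foldl_nil]
      set CF := (List.range' 1 c).foldl _ ((List.range x.length).map (fun i => PySem.Int.mod (y.getD i 0) m)) with hCF
      obtain ⟨L, GO, GI⟩ := pvDescLoop x.length (1+c) (x.length - (1+c))
        (fun i => (pvModInverse? (PySem.Int.mod (x.getD i 0 - x.getD (i - (1+c)) 0) m) m).getD 0)
        m (by omega) CF IHL
      refine ⟨L, fun i hi => ?_⟩
      rcases Nat.lt_or_ge i (1+c) with h4 | h4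
      · rw [GO i (by omega), IHG i hi]
        rcases Nat.lt_or_ge i c with h5 | h5
        · rw [if_pos h5, if_pos (by omega)]
        · have hic : i = c := by omega
          rw [if_neg (by omega), if_pos (by omega), hic, Nat.sub_self]
      · rw [GI i (by omega) (by omega), IHG i hi, IHG (i-1) (by omega)]
        rw [if_neg (by omega), if_neg (by omega), if_neg (by omega)]
        have e1 : i - 1 - c = i - (c+1) := by omega
        have e2 : i - c = i - (c+1) + 1 := by omega
        rw [e1, e2]
        show _ = pvDD x y m (i - (c+1)) (c+1)
        rw [pvDD]
        have e3 : i - (c+1) + c + 1 = i := by omega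
        have e4 : i - (1+c) = i - (c+1) := by omega
        rw [e3, e4]
        exact pvPm_cong m _ _ hm (((pvPm_modeq m _ hm).symm).mul_right _)

theorem pvCoefB_spec (x y : List Int) (m : Int) (hm : 0 < m) (hn : 0 < x.length) :
    (pvCoefB x y m).length = x.length ∧
    ∀ i, i < x.length → (pvCoefB x y m).getD i 0 = pvDD x y m 0 i := by
  obtain ⟨L, G⟩ := pvCoefB_aux x y m hm hn (x.length - 1) le_rfl
  refine ⟨L, fun i hi => ?_⟩
  rw [pvCoefB]
  rw [G i hi]
  rcases Nat.lt_or_ge i (x.length - 1) with h4 | h4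
  · rw [if_pos h4]
  · have : i = x.length - 1 := by omega
    subst this
    rw [if_neg (by omega), Nat.sub_self]

-- ---- stage 2, port A: multiply-by-linear and add-scaled loops, pointwise ----

def pvLinStep (p : List Int) (c m : Int) : List Int → Nat → List Int := fun res k =>
  let r1 := res.set k (PySem.Int.mod (res.getD k 0 + p.getD k 0 * c) m)
  r1.set (k+1) (PySem.Int.mod (r1.getD (k+1) 0 + p.getD k 0) m)

theorem pvMulLin_conv (p : List Int) (c m : Int) :
    pvMulPolyMod p [c, 1] m =
      (List.range p.length).foldl (pvLinStep p c m) (List.replicate (p.length + 1) 0) := by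
  rw [pvMulPolyMod, pvEnum_eq p 0, List.foldl_map]
  have h2 : (PySem.List.enumerate [c, 1] (0:Int)) = [((0:Int), c), ((1:Int), (1:Int))] := rfl
  rw [h2]
  have hlen : p.length + [c,1].length - 1 = p.length + 1 := by simp
  rw [hlen]
  congr 1
  funext res k
  simp only [List.foldl_cons, List.foldl_nil, pvLinStep, add_zero, zero_add, mul_one,
    Int.toNat_natCast]
  have e1 : ((k:Int) + 1).toNat = k + 1 := by omega
  rw [e1]

theorem pvMulLinAux (m : Int) (hm : 0 < m) (p : List Int) (c : Int) (cnt : Nat)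
    (hcnt : cnt ≤ p.length) :
    ((List.range cnt).foldl (pvLinStep p c m) (List.replicate (p.length + 1) 0)).length = p.length + 1 ∧
    ∀ k, ((List.range cnt).foldl (pvLinStep p c m) (List.replicate (p.length + 1) 0)).getD k 0 =
      if k < cnt then
        (if k = 0 then PySem.Int.mod (p.getD 0 0 * c) m
         else PySem.Int.mod (PySem.Int.mod (p.getD (k-1) 0) m + p.getD k 0 * c) m)
      else if k = cnt ∧ 0 < cnt then PySem.Int.mod (p.getD (cnt-1) 0) m else 0 := by
  induction cnt with
  | zero =>
      have h0 : (List.range 0) = ([] : List Nat) := rfl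
      rw [h0]
      refine ⟨by simp, fun k => ?_⟩
      simp only [List.foldl_nil, Nat.not_lt_zero, if_false, Nat.lt_irrefl, and_false]
      rw [List.getD_eq_getElem?_getD, List.getElem?_replicate]
      split_ifs <;> rfl
  | succ c' ih =>
      obtain ⟨IHL, IHG⟩ := ih (by omega)
      rw [List.range_succ, List.foldl_append, List.foldl_cons, List.foldl_nil]
      set R := (List.range c').foldl (pvLinStep p c m) (List.replicate (p.length + 1) 0) with hR
      have hRc : R.getD c' 0 = if c' = 0 then 0 else PySem.Int.mod (p.getD (c'-1) 0) m := by
        rw [IHG c']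
        split_ifs with h1 h2 h3 <;> simp_all
      have hRc1 : R.getD (c'+1) 0 = 0 := by
        rw [IHG (c'+1)]
        split_ifs with h1 h2 <;> first | rfl | omega
      have hv1 : PySem.Int.mod (R.getD c' 0 + p.getD c' 0 * c) m =
          (if c' = 0 then PySem.Int.mod (p.getD 0 0 * c) m
           else PySem.Int.mod (PySem.Int.mod (p.getD (c'-1) 0) m + p.getD c' 0 * c) m) := by
        rw [hRc]
        split_ifs with h1
        · subst h1; rw [zero_add]
        · rfl
      have hr1 : (R.set c' (PySem.Int.mod (R.getD c' 0 + p.getD c' 0 * c) m)).getD (c'+1) 0 = 0 := by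
        rw [pvGetD_set, if_neg (by omega), hRc1]
      refine ⟨by simp [pvLinStep, IHL], fun k => ?_⟩
      simp only [pvLinStep]
      rw [hr1, zero_add, pvGetD_set, pvGetD_set]
      simp only [List.length_set, IHL, IHG k]
      rcases Nat.lt_trichotomy k c' with hk | hk | hk
      · have e1 : ¬ (c' + 1 = k ∧ c' + 1 < p.length + 1) := by omega
        have e2 : ¬ (c' = k ∧ c' < p.length + 1) := by omega
        rw [if_neg e1, if_neg e2, if_pos hk, if_pos (show k < c' + 1 by omega)]
      · subst hk
        have e1 : ¬ (k + 1 = k ∧ k + 1 < p.length + 1) := by omega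
        have e2 : (k = k ∧ k < p.length + 1) := ⟨rfl, by omega⟩
        rw [if_neg e1, if_pos e2, if_pos (show k < k + 1 by omega), hv1]
      · rcases Nat.lt_or_ge k (c'+2) with hk2 | hk2
        · have hke : k = c'+1 := by omega
          subst hke
          have e1 : (c' + 1 = c' + 1 ∧ c' + 1 < p.length + 1) := ⟨rfl, by omega⟩
          rw [if_pos e1, if_neg (show ¬ (c' + 1 < c' + 1) by omega),
            if_pos (show (c' + 1 = c' + 1 ∧ 0 < c' + 1) from ⟨rfl, by omega⟩), Nat.add_sub_cancel]
        · have e1 : ¬ (c' + 1 = k ∧ c' + 1 < p.length + 1) := by omega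
          have e2 : ¬ (c' = k ∧ c' < p.length + 1) := by omega
          rw [if_neg e1, if_neg e2, if_neg (show ¬ (k < c') by omega),
            if_neg (show ¬ (k = c' ∧ 0 < c') by omega), if_neg (show ¬ (k < c' + 1) by omega),
            if_neg (show ¬ (k = c' + 1 ∧ 0 < c' + 1) by omega)]

theorem pvMulLin (m : Int) (hm : 0 < m) (p : List Int) (hp : 0 < p.length) (c : Int) :
    (pvMulPolyMod p [c, 1] m).length = p.length + 1 ∧
    ∀ k, (pvMulPolyMod p [c, 1] m).getD k 0 =
      if k = 0 then PySem.Int.mod (p.getD 0 0 * c) m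
      else PySem.Int.mod (PySem.Int.mod (p.getD (k-1) 0) m + p.getD k 0 * c) m := by
  rw [pvMulLin_conv]
  obtain ⟨L, G⟩ := pvMulLinAux m hm p c p.length le_rfl
  refine ⟨L, fun k => ?_⟩
  rw [G k]
  rcases Nat.lt_trichotomy k p.length with hk | hk | hk
  · rw [if_pos hk]
  · subst hk
    rw [if_neg (by omega), if_pos ⟨rfl, by omega⟩, if_neg (by omega)]
    rw [List.getD_eq_default _ _ le_rfl, zero_mul, add_zero, pvPm_idem m _ hm]
  · rw [if_neg (by omega), if_neg (by omega), if_neg (by omega)]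
    rw [List.getD_eq_default _ _ (by omega), List.getD_eq_default _ _ (by omega),
      zero_mul, add_zero, pvPm_zero m hm, pvPm_zero m hm]

def pvAddStep (q : List Int) (w m : Int) : List Int → Nat → List Int := fun r k =>
  r.set k (PySem.Int.mod (r.getD k 0 + w * q.getD k 0) m)

theorem pvAddLoop_conv (q r : List Int) (w m : Int) :
    (PySem.List.enumerate q 0).foldl (fun r jc =>
        r.set jc.1.toNat (PySem.Int.mod (r.getD jc.1.toNat 0 + w * jc.2) m)) r =
      (List.range q.length).foldl (pvAddStep q w m) r := by
  rw [pvEnum_eq q 0, List.foldl_map]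
  congr 1
  funext r k
  simp only [pvAddStep, zero_add, Int.toNat_natCast]

theorem pvAddLoopAux (q : List Int) (w m : Int) (r : List Int) (hr : q.length ≤ r.length)
    (cnt : Nat) (hcnt : cnt ≤ q.length) :
    ((List.range cnt).foldl (pvAddStep q w m) r).length = r.length ∧
    ∀ k, ((List.range cnt).foldl (pvAddStep q w m) r).getD k 0 =
      if k < cnt then PySem.Int.mod (r.getD k 0 + w * q.getD k 0) m else r.getD k 0 := by
  induction cnt with
  | zero =>
      have h0 : (List.range 0) = ([] : List Nat) := rfl
      rw [h0]
      exact ⟨rfl, fun k => by rw [List.foldl_nil, if_neg (by omega)]⟩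
  | succ c ih =>
      obtain ⟨IHL, IHG⟩ := ih (by omega)
      rw [List.range_succ, List.foldl_append, List.foldl_cons, List.foldl_nil]
      set R := (List.range c).foldl (pvAddStep q w m) r with hR
      refine ⟨by simp [pvAddStep, IHL], fun k => ?_⟩
      simp only [pvAddStep]
      rw [pvGetD_set, IHL]
      rcases Nat.lt_trichotomy k c with hk | hk | hk
      · have e1 : ¬ (c = k ∧ c < r.length) := by omega
        rw [if_neg e1, IHG k, if_pos hk, if_pos (show k < c + 1 by omega)]
      · subst hk
        have e1 : (k = k ∧ k < r.length) := ⟨rfl, by omega⟩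
        rw [if_pos e1, IHG k, if_neg (show ¬ (k < k) by omega), if_pos (show k < k + 1 by omega)]
      · have e1 : ¬ (c = k ∧ c < r.length) := by omega
        rw [if_neg e1, IHG k, if_neg (show ¬ (k < c) by omega), if_neg (show ¬ (k < c + 1) by omega)]

-- ---- stage 2 loop invariants ----

def pvStAn (x y : List Int) (m : Int) (t : Nat) : List Int × List Int :=
  (List.range t).foldl (fun st i =>
    let ct := pvMulPolyMod st.2 [PySem.Int.mod (-(x.getD i 0)) m, 1] m
    let res := st.1 ++ List.replicate (ct.length - st.1.length) 0
    ((PySem.List.enumerate ct).foldl (fun r jc =>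
        r.set jc.1.toNat (PySem.Int.mod (r.getD jc.1.toNat 0 + (pvNewton x y m).getD (i+1) 0 * jc.2) m)) res, ct))
    ([(pvNewton x y m).getD 0 0], [1])

theorem pvStA_eq_n (x y : List Int) (m : Int) :
    pvStA x m (pvNewton x y m) = pvStAn x y m (x.length - 1) := rfl

def pvStBn (x y : List Int) (m : Int) (c : Nat) (r : List Int) : List Int :=
  ((List.range c).reverse).foldl (fun r i =>
    (PySem.Int.mod ((pvCoefB x y m).getD i 0 - r.getD 0 0 * x.getD i 0) m ::
      (List.range' 1 (r.length - 1)).map (fun k => PySem.Int.mod (r.getD (k - 1) 0 - r.getD k 0 * x.getD i 0) m)) ++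
      [r.getD (r.length - 1) 0]) r

theorem pvStB_eq_n (x y : List Int) (m : Int) :
    pvStB x m (pvCoefB x y m) = pvStBn x y m (x.length - 1) [(pvCoefB x y m).getD (x.length - 1) 0] := rfl

theorem pvProd_succ_step (x : List Int) (t k : Nat) :
    pvProd x 0 (t+1) k = pvRefStep (pvProd x 0 t) (-(x.getD t 0)) k := by
  simp [pvProd]

theorem pvStage2A (x y : List Int) (m : Int) (hm : 0 < m) (hn : 0 < x.length) (t : Nat)
    (ht : t ≤ x.length - 1) :
    (pvStAn x y m t).1.length = t + 1 ∧ (pvStAn x y m t).2.length = t + 1 ∧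
    (∀ k, (pvStAn x y m t).1.getD k 0 = PySem.Int.mod (pvARef x y m t k) m) ∧
    (∀ k, (pvStAn x y m t).2.getD k 0 ≡ pvProd x 0 t k [ZMOD m]) := by
  induction t with
  | zero =>
      refine ⟨rfl, rfl, fun k => ?_, fun k => ?_⟩
      · match k with
        | 0 =>
            have h1 : pvARef x y m 0 0 = pvDD x y m 0 0 := by
              rw [pvARef, Finset.sum_range_one, pvProd_self]
              simp
            rw [h1, pvDD_canon x y m hm]
            rw [pvStAn, pvNewton_spec x y m hn 0 hn]
            rfl
        | k+1 =>
            rw [pvARef_vanish x y m 0 (k+1) (by omega), pvPm_zero m hm]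
            rfl
      · match k with
        | 0 => rw [pvProd_self]; rfl
        | k+1 => rw [pvProd_vanish x 0 0 (k+1) (by omega)]; rfl
  | succ t ih =>
      obtain ⟨IH1, IH2, IH3, IH4⟩ := ih (by omega)
      have hstep : pvStAn x y m (t+1) = (fun st i =>
          let ct := pvMulPolyMod st.2 [PySem.Int.mod (-(x.getD i 0)) m, 1] m
          let res := st.1 ++ List.replicate (ct.length - st.1.length) 0
          ((PySem.List.enumerate ct).foldl (fun r jc =>
              r.set jc.1.toNat (PySem.Int.mod (r.getD jc.1.toNat 0 + (pvNewton x y m).getD (i+1) 0 * jc.2) m)) res, ct))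
          (pvStAn x y m t) t := by
        rw [pvStAn, pvStAn, List.range_succ, List.foldl_append, List.foldl_cons, List.foldl_nil]
      rw [hstep]
      simp only
      set st := pvStAn x y m t with hst
      set c' := PySem.Int.mod (-(x.getD t 0)) m with hc'
      obtain ⟨ML, MG⟩ := pvMulLin m hm st.2 (by omega) c'
      set ct := pvMulPolyMod st.2 [c', 1] m with hct
      have hctlen : ct.length = t + 2 := by rw [ML, IH2]
      have hprod : ∀ k, ct.getD k 0 ≡ pvProd x 0 (t+1) k [ZMOD m] := by
        intro k
        rw [pvProd_succ_step]
        match k with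
        | 0 =>
            rw [MG 0, if_pos rfl]
            calc PySem.Int.mod (st.2.getD 0 0 * c') m
                ≡ st.2.getD 0 0 * c' [ZMOD m] := pvPm_modeq m _ hm
              _ ≡ pvProd x 0 t 0 * (-(x.getD t 0)) [ZMOD m] :=
                  Int.ModEq.mul (IH4 0) (pvPm_modeq m _ hm)
        | k+1 =>
            rw [MG (k+1), if_neg (by omega), Nat.add_sub_cancel]
            calc PySem.Int.mod (PySem.Int.mod (st.2.getD k 0) m + st.2.getD (k+1) 0 * c') m
                ≡ PySem.Int.mod (st.2.getD k 0) m + st.2.getD (k+1) 0 * c' [ZMOD m] :=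
                  pvPm_modeq m _ hm
              _ ≡ st.2.getD k 0 + st.2.getD (k+1) 0 * c' [ZMOD m] :=
                  Int.ModEq.add_right _ (pvPm_modeq m _ hm)
              _ ≡ pvProd x 0 t k + pvProd x 0 t (k+1) * (-(x.getD t 0)) [ZMOD m] :=
                  Int.ModEq.add (IH4 k) (Int.ModEq.mul (IH4 (k+1)) (pvPm_modeq m _ hm))
      set res := st.1 ++ List.replicate (ct.length - st.1.length) 0 with hres
      have hreslen : res.length = t + 2 := by
        rw [hres, List.length_append, List.length_replicate, IH1, hctlen]
        omega
      have hresget : ∀ k, res.getD k 0 = st.1.getD k 0 := fun k => pvGetD_pad _ _ _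
      rw [pvAddLoop_conv]
      obtain ⟨AL, AG⟩ := pvAddLoopAux ct ((pvNewton x y m).getD (t+1) 0) m res
        (by omega) ct.length le_rfl
      have hw : (pvNewton x y m).getD (t+1) 0 = pvDD x y m 0 (t+1) :=
        pvNewton_spec x y m hn (t+1) (by omega)
      refine ⟨by rw [AL, hreslen], by simp [hctlen], fun k => ?_, fun k => hprod k⟩
      rw [AG k, hctlen]
      rcases Nat.lt_or_ge k (t+2) with hk | hk
      · rw [if_pos hk, hresget k, IH3 k, hw]
        apply pvPm_cong m _ _ hm
        calc PySem.Int.mod (pvARef x y m t k) m + pvDD x y m 0 (t+1) * ct.getD k 0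
            ≡ pvARef x y m t k + pvDD x y m 0 (t+1) * pvProd x 0 (t+1) k [ZMOD m] :=
              Int.ModEq.add (pvPm_modeq m _ hm) (Int.ModEq.mul (Int.ModEq.refl _) (hprod k))
          _ = pvARef x y m (t+1) k := by rw [pvARef, pvARef, Finset.sum_range_succ _ (t+1)]
      · rw [if_neg (by omega), hresget k, IH3 k,
          pvARef_vanish x y m t k (by omega), pvARef_vanish x y m (t+1) k (by omega)]

theorem pvHornerGetD (hd last : Int) (g : Nat → Int) (L : Nat) (hL : 1 ≤ L) (k : Nat) :
    ((hd :: (List.range' 1 (L-1)).map g) ++ [last]).getD k 0 =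
      if k = 0 then hd else if k < L then g k else if k = L then last else 0 := by
  rw [List.cons_append]
  match k with
  | 0 => rfl
  | k+1 =>
      rw [List.getD_cons_succ, if_neg (by omega)]
      rcases Nat.lt_trichotomy (k+1) L with hk | hk | hk
      · rw [if_pos hk, List.getD_append _ _ _ _ (by simp; omega),
          PySem.List.getD_map_of_lt _ _ _ _ (by simp; omega), List.getElem_range']
        congr 1
        omega
      · rw [if_neg (by omega), if_pos hk]
        rw [List.getD_eq_getElem?_getD, List.getElem?_append_right (by simp; omega)]
        have e : k - ((List.range' 1 (L-1)).map g).length = 0 := by simp; omega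
        rw [e]
        rfl
      · rw [if_neg (by omega), if_neg (by omega)]
        rw [List.getD_eq_getElem?_getD, List.getElem?_eq_none (by simp; omega)]
        rfl

theorem pvStage2B (x y : List Int) (m : Int) (hm : 0 < m) (hn : 0 < x.length) (c : Nat)
    (hc : c ≤ x.length - 1) :
    ∀ r : List Int, r.length = x.length - c →
      (∀ k, r.getD k 0 = PySem.Int.mod (pvBRef x y m c k) m) →
      (pvStBn x y m c r).length = x.length ∧
      ∀ k, (pvStBn x y m c r).getD k 0 = PySem.Int.mod (pvBRef x y m 0 k) m := by
  induction c with
  | zero =>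
      intro r hr hrg
      rw [pvStBn]
      exact ⟨by simpa using hr, fun k => by simpa using hrg k⟩
  | succ c ih =>
      intro r hr hrg
      have hstep : pvStBn x y m (c+1) r = pvStBn x y m c
          ((PySem.Int.mod ((pvCoefB x y m).getD c 0 - r.getD 0 0 * x.getD c 0) m ::
            (List.range' 1 (r.length - 1)).map (fun k => PySem.Int.mod (r.getD (k - 1) 0 - r.getD k 0 * x.getD c 0) m)) ++
            [r.getD (r.length - 1) 0]) := by
        rw [pvStBn, pvStBn, pvRevRange_succ, List.foldl_cons]
      rw [hstep]
      have hL : r.length = x.length - (c+1) := hr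
      have hL1 : 1 ≤ r.length := by omega
      have hcoef : (pvCoefB x y m).getD c 0 = pvDD x y m 0 c :=
        (pvCoefB_spec x y m hm hn).2 c (by omega)
      refine ih (by omega) _ ?_ ?_
      · simp
        omega
      · intro k
        rw [pvHornerGetD _ _ _ r.length hL1 k]
        split_ifs with h0 h1 h2
        · subst h0
          rw [hcoef, hrg 0, pvBRef_zero_rec x y m c (by omega)]
          apply pvPm_cong m _ _ hm
          exact Int.ModEq.sub (Int.ModEq.refl _) (Int.ModEq.mul (pvPm_modeq m _ hm) (Int.ModEq.refl _))
        · obtain ⟨k', rfl⟩ : ∃ k', k = k' + 1 := ⟨k - 1, by omega⟩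
          rw [Nat.add_sub_cancel, hrg k', hrg (k'+1), pvBRef_succ_rec x y m c k' (by omega)]
          apply pvPm_cong m _ _ hm
          exact Int.ModEq.sub (pvPm_modeq m _ hm) (Int.ModEq.mul (pvPm_modeq m _ hm) (Int.ModEq.refl _))
        · subst h2
          rw [hrg (r.length - 1)]
          obtain ⟨k', hk'⟩ : ∃ k', r.length = k' + 1 := ⟨r.length - 1, by omega⟩
          rw [hk', Nat.add_sub_cancel, pvBRef_succ_rec x y m c k' (by omega),
            pvBRef_vanish x y m (c+1) (k'+1) (by omega), zero_mul, sub_zero]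
        · rw [pvBRef_vanish x y m c k (by omega), pvPm_zero m hm]

theorem pvARef_eq_pvBRef (x y : List Int) (m : Int) (hn : 0 < x.length) (k : Nat) :
    pvARef x y m (x.length - 1) k = pvBRef x y m 0 k := by
  rw [pvARef, pvBRef, Finset.range_eq_Ico]
  congr 2
  omega

-- ===== VERDICT (by name: the statement is the Claim_ definition above) =====
theorem compute_newton_coefficients_spec : Claim_equal_compute_newton_coefficients := by
  unfold Claim_equal_compute_newton_coefficients
  intro x y mod hdom hpre
  unfold Spec_compute_newton_coefficients
  obtain ⟨hn, hlen, hmz, hcond⟩ := hpre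
  by_cases hm : 0 < mod
  · rw [pvPortA_eq, pvPortB_eq, pvStA_eq_n, pvStB_eq_n]
    obtain ⟨AL, _, AG, _⟩ := pvStage2A x y mod hm hn (x.length - 1) le_rfl
    have hbase_len : [(pvCoefB x y mod).getD (x.length - 1) 0].length = x.length - (x.length - 1) := by
      simp
      omega
    have hbase : ∀ k, [(pvCoefB x y mod).getD (x.length - 1) 0].getD k 0 =
        PySem.Int.mod (pvBRef x y mod (x.length - 1) k) mod := by
      intro k
      match k with
      | 0 =>
          have h1 : pvBRef x y mod (x.length - 1) 0 = pvDD x y mod 0 (x.length - 1) := by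
            rw [pvBRef, Finset.sum_eq_sum_Ico_succ_bot (show x.length - 1 < x.length by omega),
              Nat.sub_add_cancel hn, Finset.Ico_self, Finset.sum_empty, pvProd_self]
            simp
          rw [h1, pvDD_canon x y mod hm, List.getD_cons_zero,
            (pvCoefB_spec x y mod hm hn).2 (x.length - 1) (by omega)]
      | k+1 =>
          rw [pvBRef_vanish x y mod (x.length - 1) (k+1) (by omega), pvPm_zero mod hm]
          rfl
    obtain ⟨BL, BG⟩ := pvStage2B x y mod hm hn (x.length - 1) le_rfl _ hbase_len hbase
    apply pvList_eq_of_getD _ _ (by rw [AL, BL]; omega)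
    intro k
    rw [AG k, BG k, pvARef_eq_pvBRef x y mod hn k]
  · have h1 : x.length = 1 := by
      rcases Nat.lt_or_ge x.length 2 with h | h
      · omega
      · exact absurd (hcond h).1 hm
    obtain ⟨a, ha⟩ := List.length_eq_one_iff.mp h1
    subst ha
    rfl
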